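-- pv_equiv track=rewrite | github.com/icarus1513/pythonAlgorithm | Level3/N으로 표현.py | solution
-- ===== SOURCE A (Python) =====
-- def solution(N, number):
--     answer = -1
--     DP = []
--
--     for i in range(1, 9):
--         nset = { int(str(N) * i) }
--
--         for j in range(0, i - 1):
--             for x in DP[j]:
--                 for y in DP[-j - 1]:
--                     nset.add(x + y)
--                     nset.add(x - y)
--                     nset.add(x * y)
--
--                     if y != 0:
--                         nset.add(x // y)
--
--         if number in nset:
--             return i
--
--         DP.append(nset)
--
--     return answer
-- ===== SOURCE B (Python) =====
-- def solution(N, number):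
--     # Memoized recursion over exact-count expression sets, with symmetric splits:
--     # each unordered split (a, k-a), a <= k//2, is combined in both operand orders
--     # via separate set comprehensions; a final ascending loop reads off the answer.
--     memo = {}
--
--     def expr(k):
--         if k in memo:
--             return memo[k]
--         vals = {int(str(N) * k)}
--         for a in range(1, k // 2 + 1):
--             xs, ys = expr(a), expr(k - a)
--             vals |= {x + y for x in xs for y in ys}
--             vals |= {x * y for x in xs for y in ys}
--             vals |= {x - y for x in xs for y in ys}
--             vals |= {y - x for x in xs for y in ys}
--             vals |= {x // y for x in xs for y in ys if y != 0}
--             vals |= {y // x for x in xs for y in ys if x != 0}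
--         memo[k] = vals
--         return vals
--
--     for k in range(1, 9):
--         if number in expr(k):
--             return k
--     return -1
-- ===== Notes on version B (the rewrite author's own statement) =====
-- stated objective: alternative
-- what changed: B replaces A's iterative level-indexed DP list by a memoized recursive expr(k) over a dict, combines each unordered split (a, k-a) only once for a <= k//2 using six separate set comprehensions that cover both operand orders (including y-x and y//x), and reads the answer off in a separate ascending loop.
import Mathlib
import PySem

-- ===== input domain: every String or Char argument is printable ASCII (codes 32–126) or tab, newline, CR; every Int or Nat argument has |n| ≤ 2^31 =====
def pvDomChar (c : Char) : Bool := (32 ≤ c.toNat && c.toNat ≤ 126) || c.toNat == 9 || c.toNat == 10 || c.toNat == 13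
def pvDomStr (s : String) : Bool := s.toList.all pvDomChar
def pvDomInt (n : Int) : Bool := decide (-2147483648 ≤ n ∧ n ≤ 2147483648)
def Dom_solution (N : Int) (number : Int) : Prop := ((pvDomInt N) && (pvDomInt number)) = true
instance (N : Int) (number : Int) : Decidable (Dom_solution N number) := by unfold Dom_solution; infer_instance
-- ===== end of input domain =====

-- B replaces A's iterative level-indexed DP list by a memoized recursive expr(k) over a
-- dict, combining each unordered split (a, k-a), a ≤ k//2, ONCE with six comprehensions
-- covering both operand orders; objective: alternative decomposition, similar cost.

-- Python's `set` of ints, used by BOTH Pythons, ported as an element list plus a hash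
-- index (Python's set is itself a hash set; a plain-list set would make membership linear
-- and the ports infeasible to evaluate). Only add / membership are used, and both
-- programs consume a set's ELEMENTS only order-insensitively (building other sets,
-- membership tests), so `elems` may hold them in any order; it holds each element
-- exactly once (`add` skips elements already indexed).
structure PvSet where
  elems : List Int
  index : Std.HashSet Int

def PvSet.empty : PvSet := ⟨[], ∅⟩

def PvSet.contains (s : PvSet) (x : Int) : Bool := s.index.contains x

-- s.add(x)
def PvSet.add (s : PvSet) (x : Int) : PvSet :=
  if s.index.contains x then s else ⟨x :: s.elems, s.index.insert x⟩

-- the one-element set {x}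
def PvSet.single (x : Int) : PvSet := PvSet.empty.add x

-- int(str(N) * k)  (shared by both ports: both Pythons contain this exact expression).
-- Exact via PySem.Int.toChars/ofChars?; `.getD 0` stands for the ValueError path, which
-- Pre_solution excludes (int("-5-5") raises; A reaches it iff N < 0 and number ≠ N).
def pvSeed (N : Int) (i : Int) : Int :=
  (PySem.Int.ofChars? (List.flatten (List.replicate i.toNat (PySem.Int.toChars N)))).getD 0

-- ===== PORT A =====
-- the body of `for i …`: nset = {int(str(N)*i)} then the three nested loops of A
def solutionNset (N : Int) (DP : List PvSet) (i : Int) : PvSet :=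
  (PySem.List.pyRange 0 (i - 1) 1).foldl (fun nset j =>
    (PySem.List.pyGetD DP j PvSet.empty).elems.foldl (fun nset x =>
      (PySem.List.pyGetD DP (-j - 1) PvSet.empty).elems.foldl (fun nset y =>
        let nset := ((nset.add (x + y)).add (x - y)).add (x * y)
        if y ≠ 0 then nset.add (PySem.Int.floordiv x y) else nset) nset) nset)
    (PvSet.single (pvSeed N i))

-- `for i in range(1, 9): … return i … / return answer` (answer stays -1)
def solutionLoop (N : Int) (number : Int) (DP : List PvSet) : List Int → Int
  | [] => -1
  | i :: rest =>
    let nset := solutionNset N DP i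
    if nset.contains number then i
    else solutionLoop N number (DP ++ [nset]) rest

def solution (N : Int) (number : Int) : Int :=
  solutionLoop N number [] (PySem.List.pyRange 1 9 1)

-- ===== PORT B =====
-- the six `vals |= {…}` comprehensions of one split, folded into the running set
def combineInto (xs : List Int) (ys : List Int) (vals : PvSet) : PvSet :=
  let v1 := xs.foldl (fun v x => ys.foldl (fun v y => PvSet.add v (x + y)) v) vals
  let v2 := xs.foldl (fun v x => ys.foldl (fun v y => PvSet.add v (x * y)) v) v1
  let v3 := xs.foldl (fun v x => ys.foldl (fun v y => PvSet.add v (x - y)) v) v2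
  let v4 := xs.foldl (fun v x => ys.foldl (fun v y => PvSet.add v (y - x)) v) v3
  let v5 := xs.foldl (fun v x => ys.foldl (fun v y =>
      if y ≠ 0 then PvSet.add v (PySem.Int.floordiv x y) else v) v) v4
  xs.foldl (fun v x => ys.foldl (fun v y =>
      if x ≠ 0 then PvSet.add v (PySem.Int.floordiv y x) else v) v) v5

-- bounds of `range(1, k//2 + 1)`, cited by exprB's termination proof
lemma pvHalf (k a : Int) (h1 : 1 ≤ a) (h2 : a ≤ PySem.Int.floordiv k 2) :
    a.toNat < k.toNat ∧ 1 ≤ k - a ∧ (k - a).toNat < k.toNat := by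
  rw [PySem.Int.floordiv_eq_ediv_of_pos (by norm_num)] at h2
  omega

-- `def expr(k): …` — memo check, seed, loop over the unordered splits, memo write
def exprB (N : Int) (k : Int) (memo : PySem.Dict Int PvSet) : PySem.Dict Int PvSet × PvSet :=
  match PySem.Dict.get? memo k with
  | some s => (memo, s)
  | none =>
    let st := (PySem.List.pyRange 1 (PySem.Int.floordiv k 2 + 1) 1).attach.foldl
      (fun (st : PySem.Dict Int PvSet × PvSet) ap =>
        let p1 := exprB N ap.1 st.1
        let p2 := exprB N (k - ap.1) p1.1
        (p2.1, combineInto p1.2.elems p2.2.elems st.2))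
      (memo, PvSet.single (pvSeed N k))
    (PySem.Dict.insert st.1 k st.2, st.2)
termination_by k.toNat
decreasing_by
  · have h := PySem.List.mem_pyRange_one.mp ap.2
    exact (pvHalf k ap.1 h.1 (by omega)).1
  · have h := PySem.List.mem_pyRange_one.mp ap.2
    exact (pvHalf k ap.1 h.1 (by omega)).2.2

-- `for k in range(1, 9): if number in expr(k): return k` / `return -1`
def altLoop (N : Int) (number : Int) (memo : PySem.Dict Int PvSet) : List Int → Int
  | [] => -1
  | k :: rest =>
    let p := exprB N k memo
    if p.2.contains number then k
    else altLoop N number p.1 rest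

def solution_alt (N : Int) (number : Int) : Int :=
  altLoop N number PySem.Dict.empty (PySem.List.pyRange 1 9 1)

-- ===== PRECONDITION & SPEC =====
-- Pre_ excludes exactly the inputs on which A raises ValueError: for N < 0 the seed string
-- of level 2, e.g. "-5-5", is not an int literal; A reaches it iff number ≠ N (and B raises
-- at the same point).
def Pre_solution (N : Int) (number : Int) : Prop := 0 ≤ N ∨ number = N
instance (N : Int) (number : Int) : Decidable (Pre_solution N number) := by
  unfold Pre_solution; infer_instance

def pvWitness_solution : Int × Int := (2, 7)

def Spec_solution (N : Int) (number : Int) (out : Int) : Prop := out = solution_alt N number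
instance (N : Int) (number : Int) (out : Int) : Decidable (Spec_solution N number out) := by
  unfold Spec_solution; infer_instance

-- ===== CLAIM (what is proved, stated in full; the proofs are below) =====
def Claim_equal_solution : Prop :=
  ∀ (N : Int) (number : Int), Dom_solution N number → Pre_solution N number →
    Spec_solution N number (solution N number)

-- ===== LEMMAS AND PROOFS =====

-- the well-formedness invariant of the ports' set representation: the hash index
-- indexes exactly the listed elements
def PvSet.Wf (s : PvSet) : Prop := ∀ v : Int, s.index.contains v = true ↔ v ∈ s.elems

lemma pvWf_empty : PvSet.Wf PvSet.empty := by
  intro v; simp [PvSet.empty, Std.HashSet.contains_empty]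

lemma pvAdd_wf {s : PvSet} (hs : s.Wf) (x : Int) : (s.add x).Wf := by
  intro v
  unfold PvSet.add
  split_ifs with h
  · exact hs v
  · simp only [Std.HashSet.contains_insert, Bool.or_eq_true, beq_iff_eq, List.mem_cons, hs v]
    constructor
    · rintro (rfl | hv) <;> [exact Or.inl rfl; exact Or.inr hv]
    · rintro (rfl | hv) <;> [exact Or.inl rfl; exact Or.inr hv]

lemma pvAdd_mem {s : PvSet} (hs : s.Wf) (x v : Int) :
    v ∈ (s.add x).elems ↔ v ∈ s.elems ∨ v = x := by
  unfold PvSet.add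
  split_ifs with h
  · have hx : x ∈ s.elems := (hs x).mp h
    constructor
    · exact Or.inl
    · rintro (hv | rfl) <;> [exact hv; exact hx]
  · simp only [List.mem_cons]
    constructor
    · rintro (rfl | hv) <;> [exact Or.inr rfl; exact Or.inl hv]
    · rintro (hv | rfl) <;> [exact Or.inr hv; exact Or.inl rfl]

lemma pvContains_iff {s : PvSet} (hs : s.Wf) (x : Int) :
    s.contains x = true ↔ x ∈ s.elems := hs x

lemma pvSingle_spec (x : Int) :
    (PvSet.single x).Wf ∧ ∀ v : Int, v ∈ (PvSet.single x).elems ↔ v = x := by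
  unfold PvSet.single
  refine ⟨pvAdd_wf pvWf_empty x, fun v => ?_⟩
  rw [pvAdd_mem pvWf_empty]
  simp [PvSet.empty]

-- membership and well-formedness through a foldl whose step only adds elements
lemma pv_foldl_set {β : Type} (f : PvSet → β → PvSet) (Q : β → Int → Prop)
    (hf : ∀ acc b, acc.Wf →
      (f acc b).Wf ∧ ∀ v : Int, v ∈ (f acc b).elems ↔ v ∈ acc.elems ∨ Q b v) :
    ∀ (xs : List β) (init : PvSet), init.Wf →
      (xs.foldl f init).Wf ∧
        ∀ v : Int, v ∈ (xs.foldl f init).elems ↔ v ∈ init.elems ∨ ∃ b ∈ xs, Q b v := by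
  intro xs
  induction xs with
  | nil => intro init h; exact ⟨h, by simp⟩
  | cons x xs ih =>
    intro init h
    obtain ⟨hw1, hm1⟩ := hf init x h
    obtain ⟨hw, hm⟩ := ih (f init x) hw1
    refine ⟨hw, fun v => ?_⟩
    rw [List.foldl_cons] at *
    rw [hm v, hm1 v]
    simp only [List.mem_cons]
    constructor
    · rintro ((h | h) | ⟨b, hb, hQ⟩)
      · exact Or.inl h
      · exact Or.inr ⟨x, Or.inl rfl, h⟩
      · exact Or.inr ⟨b, Or.inr hb, hQ⟩
    · rintro (h | ⟨b, rfl | hb, hQ⟩)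
      · exact Or.inl (Or.inl h)
      · exact Or.inl (Or.inr hQ)
      · exact Or.inr ⟨b, hb, hQ⟩

-- v is one of the results A derives from the ordered pair (x, y)
def pvOp (x : Int) (y : Int) (v : Int) : Prop :=
  v = x + y ∨ v = x - y ∨ v = x * y ∨ (y ≠ 0 ∧ v = PySem.Int.floordiv x y)

-- v is one of the results B derives from the unordered pair {x from xs, y from ys}
def pvC (x : Int) (y : Int) (v : Int) : Prop :=
  v = x + y ∨ v = x * y ∨ v = x - y ∨ v = y - x ∨
    (y ≠ 0 ∧ v = PySem.Int.floordiv x y) ∨ (x ≠ 0 ∧ v = PySem.Int.floordiv y x)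

-- v is expressible with exactly k copies of N (the common mathematical content)
inductive pvReach (N : Int) : Nat → Int → Prop
  | seed (k : Nat) (hk : 1 ≤ k) : pvReach N k (pvSeed N (k : Int))
  | add {a b : Nat} {x y : Int} : pvReach N a x → pvReach N b y → pvReach N (a + b) (x + y)
  | sub {a b : Nat} {x y : Int} : pvReach N a x → pvReach N b y → pvReach N (a + b) (x - y)
  | mul {a b : Nat} {x y : Int} : pvReach N a x → pvReach N b y → pvReach N (a + b) (x * y)
  | div {a b : Nat} {x y : Int} (hy : y ≠ 0) :
      pvReach N a x → pvReach N b y → pvReach N (a + b) (PySem.Int.floordiv x y)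

lemma pvReach_pos {N : Int} {k : Nat} {v : Int} (h : pvReach N k v) : 1 ≤ k := by
  induction h <;> omega

lemma pvOp_reach {N : Int} {a b : Nat} {x y v : Int} (hop : pvOp x y v)
    (hx : pvReach N a x) (hy : pvReach N b y) : pvReach N (a + b) v := by
  rcases hop with h | h | h | ⟨hy0, h⟩ <;> subst h
  · exact pvReach.add hx hy
  · exact pvReach.sub hx hy
  · exact pvReach.mul hx hy
  · exact pvReach.div hy0 hx hy

lemma pvReach_inv {N : Int} {k : Nat} {v : Int} (h : pvReach N k v) :
    v = pvSeed N (k : Int) ∨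
      ∃ a b x y, a + b = k ∧ pvReach N a x ∧ pvReach N b y ∧ pvOp x y v := by
  cases h with
  | seed k hk => exact Or.inl rfl
  | add hx hy => exact Or.inr ⟨_, _, _, _, rfl, hx, hy, Or.inl rfl⟩
  | sub hx hy => exact Or.inr ⟨_, _, _, _, rfl, hx, hy, Or.inr (Or.inl rfl)⟩
  | mul hx hy => exact Or.inr ⟨_, _, _, _, rfl, hx, hy, Or.inr (Or.inr (Or.inl rfl))⟩
  | div hy0 hx hy => exact Or.inr ⟨_, _, _, _, rfl, hx, hy, Or.inr (Or.inr (Or.inr ⟨hy0, rfl⟩))⟩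

lemma pv_step_set {nset : PvSet} (hw : nset.Wf) (x y : Int) :
    (let nset := ((nset.add (x + y)).add (x - y)).add (x * y)
     if y ≠ 0 then nset.add (PySem.Int.floordiv x y) else nset).Wf ∧
    ∀ v : Int, v ∈ (let nset := ((nset.add (x + y)).add (x - y)).add (x * y)
       if y ≠ 0 then nset.add (PySem.Int.floordiv x y) else nset).elems ↔
      v ∈ nset.elems ∨ pvOp x y v := by
  have h1 := pvAdd_wf hw (x + y)
  have h2 := pvAdd_wf h1 (x - y)
  have h3 := pvAdd_wf h2 (x * y)
  show (if y ≠ 0 then (((nset.add (x + y)).add (x - y)).add (x * y)).add (PySem.Int.floordiv x y)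
        else ((nset.add (x + y)).add (x - y)).add (x * y)).Wf ∧ _
  by_cases hy : y = 0
  · rw [if_neg (by simp [hy])]
    refine ⟨h3, fun v => ?_⟩
    rw [pvAdd_mem h2, pvAdd_mem h1, pvAdd_mem hw]
    simp only [pvOp, hy]
    constructor
    · rintro ((h | h) | h) <;> tauto
    · rintro (h | (h | h | h | ⟨hne, _⟩)) <;> tauto
  · rw [if_pos (by simp [hy])]
    refine ⟨pvAdd_wf h3 _, fun v => ?_⟩
    rw [pvAdd_mem h3, pvAdd_mem h2, pvAdd_mem h1, pvAdd_mem hw]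
    simp only [pvOp]
    constructor
    · rintro (((h | h) | h) | h) <;> tauto
    · rintro (h | (h | h | h | ⟨_, h⟩)) <;> tauto

lemma mem_nsetA (N : Int) (DP : List PvSet) (i : Int) :
    (solutionNset N DP i).Wf ∧
      ∀ v : Int, v ∈ (solutionNset N DP i).elems ↔
        v = pvSeed N i ∨ ∃ j ∈ PySem.List.pyRange 0 (i - 1) 1,
          ∃ x ∈ (PySem.List.pyGetD DP j PvSet.empty).elems,
            ∃ y ∈ (PySem.List.pyGetD DP (-j - 1) PvSet.empty).elems, pvOp x y v := by
  unfold solutionNset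
  obtain ⟨hws, hms⟩ := pvSingle_spec (pvSeed N i)
  obtain ⟨hw, hm⟩ := pv_foldl_set _
    (fun j v => ∃ x ∈ (PySem.List.pyGetD DP j PvSet.empty).elems,
      ∃ y ∈ (PySem.List.pyGetD DP (-j - 1) PvSet.empty).elems, pvOp x y v)
    (fun acc j hacc => by
      obtain ⟨hw2, hm2⟩ := pv_foldl_set _
        (fun x v => ∃ y ∈ (PySem.List.pyGetD DP (-j - 1) PvSet.empty).elems, pvOp x y v)
        (fun acc2 x hacc2 => by
          obtain ⟨hw3, hm3⟩ := pv_foldl_set _ (fun y v => pvOp x y v)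
            (fun acc3 y hacc3 => pv_step_set hacc3 x y)
            (PySem.List.pyGetD DP (-j - 1) PvSet.empty).elems acc2 hacc2
          exact ⟨hw3, hm3⟩)
        (PySem.List.pyGetD DP j PvSet.empty).elems acc hacc
      exact ⟨hw2, hm2⟩)
    (PySem.List.pyRange 0 (i - 1) 1) _ hws
  refine ⟨hw, fun v => ?_⟩
  rw [hm v]
  constructor
  · rintro (h | h)
    · exact Or.inl ((hms v).mp h)
    · exact Or.inr h
  · rintro (h | h)
    · exact Or.inl ((hms v).mpr h)
    · exact Or.inr h

-- under the DP invariant, A's level-(m+1) set is exactly pvReach N (m+1)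
lemma nsetA_reach (N : Int) (DP : List PvSet) (m : Nat) (hlen : DP.length = m)
    (hinv : ∀ (j : Nat) (hj : j < DP.length) (v : Int), v ∈ DP[j].elems ↔ pvReach N (j + 1) v)
    (v : Int) : v ∈ (solutionNset N DP ((m : Int) + 1)).elems ↔ pvReach N (m + 1) v := by
  have hcast : ((m : Int) + 1) - 1 = (m : Int) := by ring
  rw [(mem_nsetA N DP ((m : Int) + 1)).2, hcast]
  constructor
  · rintro (rfl | ⟨j, hj, x, hx, y, hy, hop⟩)
    · have := pvReach.seed (N := N) (m + 1) (by omega)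
      simpa using this
    · rw [PySem.List.mem_pyRange_one] at hj
      obtain ⟨hj0, hjm⟩ := hj
      set jn := j.toNat with hjn
      have hjeq : j = (jn : Int) := by omega
      have hjnm : jn < m := by omega
      rw [hjeq, PySem.List.pyGetD_eq_getElem DP PvSet.empty (by omega) (by simp [hlen]; omega)] at hx
      have hxr : pvReach N (jn + 1) x := by
        have := (hinv (((jn : Int)).toNat) (by simp [hlen]; omega) x).mp hx
        simpa using this
      have hyidx : -(jn : Int) - 1 = -(((jn + 1 : Nat)) : Int) := by push_cast; ring
      rw [hjeq, hyidx, PySem.List.pyGetD_neg_natCast DP (jn + 1) PvSet.empty (by omega) (by omega)] at hy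
      have hyr : pvReach N (m - jn) y := by
        have := (hinv (DP.length - (jn + 1)) (by omega) y).mp hy
        have heq : DP.length - (jn + 1) + 1 = m - jn := by omega
        rwa [heq] at this
      have := pvOp_reach hop hxr hyr
      rwa [show jn + 1 + (m - jn) = m + 1 by omega] at this
  · intro h
    rcases pvReach_inv h with hv | ⟨a, b, x, y, hab, hx, hy, hop⟩
    · left; rw [hv]; norm_cast
    · right
      have ha1 : 1 ≤ a := pvReach_pos hx
      have hb1 : 1 ≤ b := pvReach_pos hy
      refine ⟨((a : Int) - 1), ?_, x, ?_, y, ?_, hop⟩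
      · rw [PySem.List.mem_pyRange_one]; omega
      · have hidx : (a : Int) - 1 = ((a - 1 : Nat) : Int) := by omega
        rw [hidx, PySem.List.pyGetD_eq_getElem DP PvSet.empty (by omega) (by simp [hlen]; omega)]
        have := (hinv (((a - 1 : Nat) : Int)).toNat (by simp [hlen]; omega) x).mpr ?_
        · simpa using this
        · have : ((a - 1 : Nat) : Int).toNat + 1 = a := by omega
          rwa [this]
      · have hidx : -((a : Int) - 1) - 1 = -((a : Nat) : Int) := by omega
        rw [hidx, PySem.List.pyGetD_neg_natCast DP a PvSet.empty (by omega) (by omega)]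
        exact (hinv (DP.length - a) (by omega) y).mpr
          (by rwa [show DP.length - a + 1 = b by omega])

-- one unguarded comprehension stage of combineInto
lemma pv_stage (xs ys : List Int) (f : Int → Int → Int) (init : PvSet) (h : init.Wf) :
    (xs.foldl (fun v x => ys.foldl (fun v y => PvSet.add v (f x y)) v) init).Wf ∧
      ∀ v : Int, v ∈ (xs.foldl (fun v x => ys.foldl (fun v y => PvSet.add v (f x y)) v) init).elems ↔
        v ∈ init.elems ∨ ∃ x ∈ xs, ∃ y ∈ ys, v = f x y := by
  exact pv_foldl_set _ (fun x v => ∃ y ∈ ys, v = f x y)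
    (fun acc x hacc => pv_foldl_set _ (fun y v => v = f x y)
      (fun acc2 y hacc2 => ⟨pvAdd_wf hacc2 _, fun v => pvAdd_mem hacc2 _ v⟩) ys acc hacc)
    xs init h

-- one guarded comprehension stage of combineInto
lemma pv_stage_if (xs ys : List Int) (c : Int → Int → Prop) [∀ x y, Decidable (c x y)]
    (f : Int → Int → Int) (init : PvSet) (h : init.Wf) :
    (xs.foldl (fun v x => ys.foldl (fun v y => if c x y then PvSet.add v (f x y) else v) v) init).Wf ∧
      ∀ v : Int, v ∈ (xs.foldl (fun v x => ys.foldl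
          (fun v y => if c x y then PvSet.add v (f x y) else v) v) init).elems ↔
        v ∈ init.elems ∨ ∃ x ∈ xs, ∃ y ∈ ys, c x y ∧ v = f x y := by
  exact pv_foldl_set _ (fun x v => ∃ y ∈ ys, c x y ∧ v = f x y)
    (fun acc x hacc => pv_foldl_set _ (fun y v => c x y ∧ v = f x y)
      (fun acc2 y hacc2 => by
        split_ifs with hc
        · refine ⟨pvAdd_wf hacc2 _, fun v => ?_⟩
          rw [pvAdd_mem hacc2]
          tauto
        · exact ⟨hacc2, fun v => by tauto⟩) ys acc hacc)
    xs init h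

lemma mem_combineInto (xs ys : List Int) (vals : PvSet) (h : vals.Wf) :
    (combineInto xs ys vals).Wf ∧
      ∀ v : Int, v ∈ (combineInto xs ys vals).elems ↔
        v ∈ vals.elems ∨ ∃ x ∈ xs, ∃ y ∈ ys, pvC x y v := by
  unfold combineInto
  obtain ⟨w1, m1⟩ := pv_stage xs ys (fun x y => x + y) vals h
  obtain ⟨w2, m2⟩ := pv_stage xs ys (fun x y => x * y) _ w1
  obtain ⟨w3, m3⟩ := pv_stage xs ys (fun x y => x - y) _ w2
  obtain ⟨w4, m4⟩ := pv_stage xs ys (fun x y => y - x) _ w3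
  obtain ⟨w5, m5⟩ := pv_stage_if xs ys (fun _ y => y ≠ 0) (fun x y => PySem.Int.floordiv x y) _ w4
  obtain ⟨w6, m6⟩ := pv_stage_if xs ys (fun x _ => x ≠ 0) (fun x y => PySem.Int.floordiv y x) _ w5
  refine ⟨w6, fun v => ?_⟩
  rw [m6 v, m5 v, m4 v, m3 v, m2 v, m1 v]
  simp only [pvC]
  constructor
  · rintro ((((((h | ⟨x, hx, y, hy, hc⟩) | ⟨x, hx, y, hy, hc⟩) | ⟨x, hx, y, hy, hc⟩)
        | ⟨x, hx, y, hy, hc⟩) | ⟨x, hx, y, hy, hc⟩) | ⟨x, hx, y, hy, hc⟩)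
    · exact Or.inl h
    · exact Or.inr ⟨x, hx, y, hy, Or.inl hc⟩
    · exact Or.inr ⟨x, hx, y, hy, Or.inr (Or.inl hc)⟩
    · exact Or.inr ⟨x, hx, y, hy, Or.inr (Or.inr (Or.inl hc))⟩
    · exact Or.inr ⟨x, hx, y, hy, Or.inr (Or.inr (Or.inr (Or.inl hc)))⟩
    · exact Or.inr ⟨x, hx, y, hy, Or.inr (Or.inr (Or.inr (Or.inr (Or.inl hc))))⟩
    · exact Or.inr ⟨x, hx, y, hy, Or.inr (Or.inr (Or.inr (Or.inr (Or.inr hc))))⟩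
  · rintro (h | ⟨x, hx, y, hy, hc | hc | hc | hc | hc | hc⟩)
    · exact Or.inl (Or.inl (Or.inl (Or.inl (Or.inl (Or.inl h)))))
    · exact Or.inl (Or.inl (Or.inl (Or.inl (Or.inl (Or.inr ⟨x, hx, y, hy, hc⟩)))))
    · exact Or.inl (Or.inl (Or.inl (Or.inl (Or.inr ⟨x, hx, y, hy, hc⟩))))
    · exact Or.inl (Or.inl (Or.inl (Or.inr ⟨x, hx, y, hy, hc⟩)))
    · exact Or.inl (Or.inl (Or.inr ⟨x, hx, y, hy, hc⟩))
    · exact Or.inl (Or.inr ⟨x, hx, y, hy, hc⟩)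
    · exact Or.inr ⟨x, hx, y, hy, hc⟩

-- the memo invariant: every stored set is the exact-count set of its key
def MemoOK (N : Int) (memo : PySem.Dict Int PvSet) : Prop :=
  ∀ (j : Int) (s : PvSet), PySem.Dict.get? memo j = some s →
    1 ≤ j ∧ s.Wf ∧ ∀ v : Int, v ∈ s.elems ↔ pvReach N j.toNat v

-- the symmetric-split characterisation: seed + both-order combinations over the
-- unordered splits a ≤ k//2 generate exactly the exact-count-k values
lemma sym_split (N k : Int) (hk : 1 ≤ k) (v : Int) :
    (v = pvSeed N k ∨ ∃ a, (1 ≤ a ∧ a < PySem.Int.floordiv k 2 + 1) ∧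
        ∃ x y, pvReach N a.toNat x ∧ pvReach N (k - a).toNat y ∧ pvC x y v) ↔
      pvReach N k.toNat v := by
  have hfd : PySem.Int.floordiv k 2 = k / 2 :=
    PySem.Int.floordiv_eq_ediv_of_pos (by norm_num)
  constructor
  · rintro (rfl | ⟨a, ⟨ha1, ha2⟩, x, y, hx, hy, hc⟩)
    · have := pvReach.seed (N := N) k.toNat (by omega)
      rwa [show ((k.toNat : Int)) = k by omega] at this
    · rw [hfd] at ha2
      have hsum : a.toNat + (k - a).toNat = k.toNat := by omega
      rcases hc with hc | hc | hc | hc | ⟨h0, hc⟩ | ⟨h0, hc⟩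
      · rw [hc, ← hsum]; exact pvReach.add hx hy
      · rw [hc, ← hsum]; exact pvReach.mul hx hy
      · rw [hc, ← hsum]; exact pvReach.sub hx hy
      · rw [hc, ← hsum, Nat.add_comm]; exact pvReach.sub hy hx
      · rw [hc, ← hsum]; exact pvReach.div h0 hx hy
      · rw [hc, ← hsum, Nat.add_comm]; exact pvReach.div h0 hy hx
  · intro h
    rcases pvReach_inv h with hv | ⟨a, b, x, y, hab, hx, hy, hop⟩
    · left; rw [hv, show ((k.toNat : Int)) = k by omega]
    · right
      have ha1 : 1 ≤ a := pvReach_pos hx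
      have hb1 : 1 ≤ b := pvReach_pos hy
      rcases Nat.lt_or_ge b a with hlt | hle
      · refine ⟨(b : Int), ⟨by omega, by rw [hfd]; omega⟩, y, x, ?_, ?_, ?_⟩
        · simpa using hy
        · rwa [show (k - (b : Int)).toNat = a by omega]
        · rcases hop with h' | h' | h' | ⟨h0, h'⟩
          · exact Or.inl (by rw [h']; exact add_comm x y)
          · exact Or.inr (Or.inr (Or.inr (Or.inl h')))
          · exact Or.inr (Or.inl (by rw [h']; exact mul_comm x y))
          · exact Or.inr (Or.inr (Or.inr (Or.inr (Or.inr ⟨h0, h'⟩))))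
      · refine ⟨(a : Int), ⟨by omega, by rw [hfd]; omega⟩, x, y, ?_, ?_, ?_⟩
        · simpa using hx
        · rwa [show (k - (a : Int)).toNat = b by omega]
        · rcases hop with h' | h' | h' | ⟨h0, h'⟩
          · exact Or.inl h'
          · exact Or.inr (Or.inr (Or.inl h'))
          · exact Or.inr (Or.inl h')
          · exact Or.inr (Or.inr (Or.inr (Or.inr (Or.inl ⟨h0, h'⟩))))
-- exprB returns the exact-count set of k and preserves the memo invariant
lemma exprB_spec (N : Int) :
    ∀ (n : Nat) (k : Int), k.toNat ≤ n → 1 ≤ k →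
      ∀ memo, MemoOK N memo →
        MemoOK N (exprB N k memo).1 ∧ (exprB N k memo).2.Wf ∧
          ∀ v : Int, v ∈ (exprB N k memo).2.elems ↔ pvReach N k.toNat v := by
  intro n
  induction n with
  | zero => intro k hkn hk; omega
  | succ n IH =>
    intro k hkn hk memo hm
    rw [exprB]
    cases hget : PySem.Dict.get? memo k with
    | some s =>
      obtain ⟨_, hwf, hchar⟩ := hm k s hget
      exact ⟨hm, hwf, hchar⟩
    | none =>
      obtain ⟨hws, hms⟩ := pvSingle_spec (pvSeed N k)
      have aux : ∀ (L : List {a // a ∈ PySem.List.pyRange 1 (PySem.Int.floordiv k 2 + 1) 1})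
          (st0 : PySem.Dict Int PvSet × PvSet), MemoOK N st0.1 → st0.2.Wf →
          MemoOK N (L.foldl (fun (st : PySem.Dict Int PvSet × PvSet) ap =>
              let p1 := exprB N ap.1 st.1
              let p2 := exprB N (k - ap.1) p1.1
              (p2.1, combineInto p1.2.elems p2.2.elems st.2)) st0).1 ∧
          (L.foldl (fun (st : PySem.Dict Int PvSet × PvSet) ap =>
              let p1 := exprB N ap.1 st.1
              let p2 := exprB N (k - ap.1) p1.1
              (p2.1, combineInto p1.2.elems p2.2.elems st.2)) st0).2.Wf ∧
          ∀ v : Int, v ∈ (L.foldl (fun (st : PySem.Dict Int PvSet × PvSet) ap =>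
              let p1 := exprB N ap.1 st.1
              let p2 := exprB N (k - ap.1) p1.1
              (p2.1, combineInto p1.2.elems p2.2.elems st.2)) st0).2.elems ↔
            v ∈ st0.2.elems ∨ ∃ ap ∈ L, ∃ x y, pvReach N (ap.1.toNat) x ∧
              pvReach N ((k - ap.1).toNat) y ∧ pvC x y v := by
        intro L
        induction L with
        | nil => intro st0 h1 h2; exact ⟨h1, h2, by simp⟩
        | cons ap L ihL =>
          intro st0 h1 h2
          have hbound := PySem.List.mem_pyRange_one.mp ap.2
          have hh := pvHalf k ap.1 hbound.1 (by omega)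
          obtain ⟨hm1, hw1, hc1⟩ := IH ap.1 (by omega) hbound.1 st0.1 h1
          obtain ⟨hm2, hw2, hc2⟩ := IH (k - ap.1) (by omega) hh.2.1 _ hm1
          obtain ⟨hwc, hmc⟩ := mem_combineInto (exprB N ap.1 st0.1).2.elems
            (exprB N (k - ap.1) (exprB N ap.1 st0.1).1).2.elems st0.2 h2
          obtain ⟨hmf, hwf, hcf⟩ := ihL ((exprB N (k - ap.1) (exprB N ap.1 st0.1).1).1,
            combineInto (exprB N ap.1 st0.1).2.elems
              (exprB N (k - ap.1) (exprB N ap.1 st0.1).1).2.elems st0.2) hm2 hwc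
          have hred : ((ap :: L).foldl (fun (st : PySem.Dict Int PvSet × PvSet) ap =>
              let p1 := exprB N ap.1 st.1
              let p2 := exprB N (k - ap.1) p1.1
              (p2.1, combineInto p1.2.elems p2.2.elems st.2)) st0) =
              (L.foldl (fun (st : PySem.Dict Int PvSet × PvSet) ap =>
              let p1 := exprB N ap.1 st.1
              let p2 := exprB N (k - ap.1) p1.1
              (p2.1, combineInto p1.2.elems p2.2.elems st.2))
              ((exprB N (k - ap.1) (exprB N ap.1 st0.1).1).1,
                combineInto (exprB N ap.1 st0.1).2.elems
                  (exprB N (k - ap.1) (exprB N ap.1 st0.1).1).2.elems st0.2)) := by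
            rw [List.foldl_cons]
          rw [hred]
          refine ⟨hmf, hwf, fun v => ?_⟩
          rw [hcf v, hmc v]
          constructor
          · rintro ((h | ⟨x, hx, y, hy, hc⟩) | ⟨ap', hap', hq⟩)
            · exact Or.inl h
            · exact Or.inr ⟨ap, List.mem_cons_self, x, y, (hc1 x).mp hx, (hc2 y).mp hy, hc⟩
            · exact Or.inr ⟨ap', List.mem_cons_of_mem _ hap', hq⟩
          · rintro (h | ⟨ap', hap', hq⟩)
            · exact Or.inl (Or.inl h)
            · rcases List.mem_cons.mp hap' with rfl | hap'
              · obtain ⟨x, y, hx, hy, hc⟩ := hq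
                exact Or.inl (Or.inr ⟨x, (hc1 x).mpr hx, y, (hc2 y).mpr hy, hc⟩)
              · exact Or.inr ⟨ap', hap', hq⟩
      obtain ⟨hmf, hwf, hcf⟩ := aux (PySem.List.pyRange 1 (PySem.Int.floordiv k 2 + 1) 1).attach
        (memo, PvSet.single (pvSeed N k)) hm hws
      have hchar : ∀ v : Int, v ∈ ((PySem.List.pyRange 1 (PySem.Int.floordiv k 2 + 1) 1).attach.foldl
          (fun (st : PySem.Dict Int PvSet × PvSet) ap =>
            let p1 := exprB N ap.1 st.1
            let p2 := exprB N (k - ap.1) p1.1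
            (p2.1, combineInto p1.2.elems p2.2.elems st.2))
          (memo, PvSet.single (pvSeed N k))).2.elems ↔ pvReach N k.toNat v := by
        intro v
        rw [hcf v]
        rw [← sym_split N k hk v]
        constructor
        · rintro (h | ⟨ap, _, hq⟩)
          · exact Or.inl ((hms v).mp h)
          · exact Or.inr ⟨ap.1, PySem.List.mem_pyRange_one.mp ap.2, hq⟩
        · rintro (h | ⟨a, hab, hq⟩)
          · exact Or.inl ((hms v).mpr h)
          · exact Or.inr ⟨⟨a, PySem.List.mem_pyRange_one.mpr hab⟩, List.mem_attach _ _, hq⟩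
      refine ⟨?_, hwf, hchar⟩
      intro j s hjs
      rw [PySem.Dict.get?_insert] at hjs
      by_cases hjk : j = k
      · rw [if_pos hjk] at hjs
        cases hjs
        subst hjk
        exact ⟨hk, hwf, hchar⟩
      · rw [if_neg hjk] at hjs
        exact hmf j s hjs

-- the two outer loops in lockstep
lemma loop_eq (N : Int) (number : Int) :
    ∀ (rest : List Int) (m : Nat) (DP : List PvSet) (memo : PySem.Dict Int PvSet),
      rest = PySem.List.pyRange ((m : Int) + 1) 9 1 →
      DP.length = m →
      (∀ (j : Nat) (hj : j < DP.length) (v : Int), v ∈ DP[j].elems ↔ pvReach N (j + 1) v) →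
      MemoOK N memo →
      solutionLoop N number DP rest = altLoop N number memo rest := by
  intro rest
  induction rest with
  | nil => intro m DP memo _ _ _ _; rfl
  | cons i rest ih =>
    intro m DP memo hrange hDPlen hDPinv hmemo
    have hm9 : (m : Int) + 1 < 9 := by
      by_contra hge
      rw [PySem.List.pyRange_one_eq_nil (by omega)] at hrange
      exact List.cons_ne_nil _ _ hrange
    rw [PySem.List.pyRange_one_cons hm9] at hrange
    obtain ⟨rfl, rfl⟩ : i = (m : Int) + 1 ∧ rest = PySem.List.pyRange ((m : Int) + 1 + 1) 9 1 :=
      ⟨(List.cons.injEq _ _ _ _ ▸ hrange).1, (List.cons.injEq _ _ _ _ ▸ hrange).2⟩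
    have hnset : ∀ v : Int, v ∈ (solutionNset N DP ((m : Int) + 1)).elems ↔ pvReach N (m + 1) v :=
      nsetA_reach N DP m hDPlen hDPinv
    obtain ⟨hmemo', hwB, hcB⟩ := exprB_spec N (m + 1) ((m : Int) + 1) (by omega) (by omega) memo hmemo
    have hcB' : ∀ v : Int, v ∈ (exprB N ((m : Int) + 1) memo).2.elems ↔ pvReach N (m + 1) v := by
      intro v
      rw [hcB v, show ((m : Int) + 1).toNat = m + 1 by omega]
    have hcond : (solutionNset N DP ((m : Int) + 1)).contains number =
        (exprB N ((m : Int) + 1) memo).2.contains number := by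
      rw [Bool.eq_iff_iff, pvContains_iff (mem_nsetA N DP _).1, pvContains_iff hwB,
        hnset, hcB']
    simp only [solutionLoop, altLoop]
    rw [← hcond]
    by_cases hc : (solutionNset N DP ((m : Int) + 1)).contains number = true
    · rw [if_pos hc, if_pos hc]
    · rw [if_neg hc, if_neg hc]
      refine ih (m + 1) (DP ++ [solutionNset N DP ((m : Int) + 1)])
        (exprB N ((m : Int) + 1) memo).1
        (by push_cast; ring_nf) (by simp [hDPlen]) ?_ hmemo'
      intro j hj v
      simp only [List.length_append, List.length_cons, List.length_nil] at hj
      rcases Nat.lt_or_ge j DP.length with hlt | hge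
      · rw [List.getElem_append_left hlt]
        exact hDPinv j hlt v
      · have hj' : j = DP.length := by omega
        subst hj'
        simp only [List.getElem_concat_length, hDPlen]
        exact hnset v

-- the empty dict satisfies the memo invariant
lemma memoOK_empty (N : Int) : MemoOK N PySem.Dict.empty := by
  intro j s hjs
  simp [PySem.Dict.get?, PySem.Dict.empty] at hjs

-- ===== VERDICT (by name: the statement is the Claim_ definition above) =====
theorem solution_spec : Claim_equal_solution := by
  intro N number _ _
  unfold Spec_solution solution solution_alt
  refine loop_eq N number _ 0 [] PySem.Dict.empty ?_ rfl ?_ (memoOK_empty N)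
  · norm_num
  · intro j hj; simp at hj
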